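-- pv_equiv track=rewrite | github.com/phatakshaunak/scaler_academy | DSA_Problem_Solving/Problem_Solving_2/maximum_difference.py | solve
-- ===== SOURCE A (Python) =====
-- def solve(A, B):
--     '''
--     Simply sorting, selecting sum of first B elements as s1 works in case of only won't work in case of having a mixture of positive and negative numbers. For this case, we need to slide a window of size B across the array and compare values for |s1-s2|
--     |s1-s2| is simply |2*s1-arr_sum|. Since arr_sum is fixed, we need to find a maximum value for s1,
--     '''
--     A.sort()
--
--     arr_sum = sum(A)
--     sum1 = sum(A[0:B])
--
--     max_val = abs((2*sum1)-arr_sum)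
--
--     for i in range(B,len(A)):
--         sum1 = sum1 + A[i] - A[i-B]
--         max_val = max(max_val, ((2*sum1)-arr_sum))
--
--     return max_val
-- ===== SOURCE B (Python) =====
-- def solve(A, B):
--     # Sort, then use monotonicity of window sums on a sorted array:
--     # only the smallest-B and largest-B windows can attain the maximum of |2*s - total|.
--     A.sort()
--     total = sum(A)
--     s_min = sum(A[:B])
--     s_max = sum(A[max(0, len(A) - B):])
--     return max(abs(2 * s_min - total), abs(2 * s_max - total))
-- ===== Notes on version B (the rewrite author's own statement) =====
-- stated objective: simpler
-- what changed: The O(n) sliding-window loop over all size-B windows is replaced by two extremal partial sums (first B and last B elements of the sorted array), valid because window sums are monotone on a sorted array; Pre_ (0 <= B) excludes exactly the negative-B inputs on which A raises IndexError.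
import Mathlib
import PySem

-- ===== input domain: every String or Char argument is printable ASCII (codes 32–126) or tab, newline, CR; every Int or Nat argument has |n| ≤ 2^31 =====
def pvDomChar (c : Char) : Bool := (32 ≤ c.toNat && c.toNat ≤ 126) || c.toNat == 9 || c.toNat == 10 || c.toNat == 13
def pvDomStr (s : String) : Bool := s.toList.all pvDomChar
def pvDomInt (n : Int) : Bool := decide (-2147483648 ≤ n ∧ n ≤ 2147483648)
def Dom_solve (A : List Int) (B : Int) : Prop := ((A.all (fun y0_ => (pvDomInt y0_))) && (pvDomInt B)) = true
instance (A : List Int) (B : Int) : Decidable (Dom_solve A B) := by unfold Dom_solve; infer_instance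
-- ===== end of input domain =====

-- B replaces A's sliding-window scan by the two extremal window sums of the sorted array (simpler);
-- both A and B sort the list argument in place, and the equivalence proved is about the return value.

-- ===== PORT A =====
def solve (A : List Int) (B : Int) : Int :=
  let S := PySem.List.sorted A (fun x => x) false
  let arrSum := S.sum
  let sum1 := (PySem.List.slice S (some 0) (some B)).sum
  let maxVal := |2 * sum1 - arrSum|
  ((PySem.List.pyRange B ((S.length : Int)) 1).foldl
    (fun (st : Int × Int) i =>
      let s1 := st.1 + PySem.List.pyGetD S i 0 - PySem.List.pyGetD S (i - B) 0
      (s1, max st.2 (2 * s1 - arrSum)))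
    (sum1, maxVal)).2

-- ===== PORT B =====
def solve_alt (A : List Int) (B : Int) : Int :=
  let S := PySem.List.sorted A (fun x => x) false
  let total := S.sum
  let sMin := (PySem.List.slice S none (some B)).sum
  let sMax := (PySem.List.slice S (some (max 0 ((S.length : Int) - B))) none).sum
  max (|2 * sMin - total|) (|2 * sMax - total|)

-- ===== PRECONDITION & SPEC =====
-- For every B < 0 the loop in A reads A[i-B] past the end of the list and raises IndexError,
-- so Pre_ excludes exactly the inputs on which A raises.
def Pre_solve (_A : List Int) (B : Int) : Prop := 0 ≤ B
instance (A : List Int) (B : Int) : Decidable (Pre_solve A B) := by unfold Pre_solve; infer_instance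
def pvWitness_solve : List Int × Int := ([3, -1, 2], 2)

def Spec_solve (A : List Int) (B : Int) (out : Int) : Prop := out = solve_alt A B
instance (A : List Int) (B : Int) (out : Int) : Decidable (Spec_solve A B out) := by unfold Spec_solve; infer_instance

-- ===== CLAIM (what is proved, stated in full; the proofs are below) =====
def Claim_equal_solve : Prop := ∀ (A : List Int) (B : Int), Dom_solve A B → Pre_solve A B → Spec_solve A B (solve A B)

-- ===== LEMMAS AND PROOFS =====

-- window-sum step: sliding the size-b window one step right adds S[b+j] and removes S[j]
theorem pv_step_w (S : List Int) (b j : Nat) (hj : b + j < S.length) :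
    ((S.drop (j+1)).take b).sum = ((S.drop j).take b).sum + S[b+j] - S[j] := by
  cases b with
  | zero => simp
  | succ b' =>
    have hjlen : j < S.length := by omega
    have hdrop : S.drop j = S[j] :: S.drop (j+1) := List.drop_eq_getElem_cons hjlen
    have hlen : b' < (S.drop (j+1)).length := by simp; omega
    have h2 : ((S.drop (j+1)).take (b'+1)).sum
        = ((S.drop (j+1)).take b').sum + (S.drop (j+1))[b'] := by
      rw [List.take_add_one, List.getElem?_eq_getElem hlen]
      simp
    have h3 : (S.drop (j+1))[b']'hlen = S[b'+1+j]'(by omega) := by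
      rw [List.getElem_drop]
      congr 1
      omega
    have h4 : ((S.drop j).take (b'+1)).sum = S[j] + ((S.drop (j+1)).take b').sum := by
      rw [hdrop, List.take_succ_cons, List.sum_cons]
    rw [h2, h3, h4]
    omega

theorem pv_step_mono (S : List Int) (hS : S.Pairwise (· ≤ ·)) (b j : Nat)
    (hj : b + j < S.length) :
    ((S.drop j).take b).sum ≤ ((S.drop (j+1)).take b).sum := by
  rw [pv_step_w S b j hj]
  have hle : S[j]'(by omega) ≤ S[b+j]'hj := by
    rcases Nat.eq_zero_or_pos b with hb | hb
    · subst hb; simp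
    · exact (List.pairwise_iff_getElem.mp hS) j (b+j) (by omega) hj (by omega)
  omega

theorem pv_w_le (S : List Int) (hS : S.Pairwise (· ≤ ·)) (b : Nat) :
    ∀ m : Nat, b + m ≤ S.length → (S.take b).sum ≤ ((S.drop m).take b).sum := by
  intro m
  induction m with
  | zero => simp
  | succ m ih =>
    intro hm
    exact le_trans (ih (by omega)) (pv_step_mono S hS b m (by omega))

-- loop invariant for A's sliding-window fold
theorem pv_fold_inv (S : List Int) (hS : S.Pairwise (· ≤ ·)) (b : Nat) (T : Int) :
    ∀ m : Nat, b + m ≤ S.length →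
    ((PySem.List.pyRange (b : Int) ((b : Int) + (m : Int)) 1).foldl
      (fun (st : Int × Int) i =>
        let s1 := st.1 + PySem.List.pyGetD S i 0 - PySem.List.pyGetD S (i - (b : Int)) 0
        (s1, max st.2 (2 * s1 - T)))
      ((S.take b).sum, |2 * (S.take b).sum - T|))
    = (((S.drop m).take b).sum,
       max (|2 * (S.take b).sum - T|) (2 * ((S.drop m).take b).sum - T)) := by
  intro m
  induction m with
  | zero =>
    intro _
    rw [PySem.List.pyRange_one_eq_nil (by omega)]
    simp only [List.foldl_nil, List.drop_zero]
    exact Prod.ext rfl (max_eq_left (le_abs_self _)).symm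
  | succ m ih =>
    intro hm
    have hsplit : PySem.List.pyRange (b : Int) ((b : Int) + ((m+1 : Nat) : Int)) 1
        = PySem.List.pyRange (b : Int) ((b : Int) + (m : Int)) 1 ++ [(b : Int) + (m : Int)] := by
      have : ((b : Int) + ((m+1 : Nat) : Int)) = ((b : Int) + (m : Int)) + 1 := by push_cast; ring_nf
      rw [this, PySem.List.pyRange_one_succ_right (by omega)]
    rw [hsplit, List.foldl_append, ih (by omega)]
    have hget1 : PySem.List.pyGetD S ((b : Int) + (m : Int)) 0 = S[b+m]'(by omega) := by
      have h : ((b : Int) + (m : Int)) = ((b + m : Nat) : Int) := by push_cast; ring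
      rw [h, PySem.List.pyGetD_natCast, List.getD_eq_getElem _ _ (by omega)]
    have hget2 : PySem.List.pyGetD S ((b : Int) + (m : Int) - (b : Int)) 0 = S[m]'(by omega) := by
      have h : ((b : Int) + (m : Int) - (b : Int)) = ((m : Nat) : Int) := by push_cast; ring
      rw [h, PySem.List.pyGetD_natCast, List.getD_eq_getElem _ _ (by omega)]
    simp only [List.foldl_cons, List.foldl_nil, hget1, hget2]
    have hstep : ((S.drop m).take b).sum + S[b+m]'(by omega) - S[m]'(by omega)
        = ((S.drop (m+1)).take b).sum := by
      rw [pv_step_w S b m (by omega)]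
    have hmono : ((S.drop m).take b).sum ≤ ((S.drop (m+1)).take b).sum :=
      pv_step_mono S hS b m (by omega)
    rw [hstep]
    refine Prod.ext rfl ?_
    simp only
    omega

-- the final max over raw window values equals the max of the two absolute extremes
theorem pv_abs_max (a c : Int) (hac : a ≤ c) : max |a| c = max |a| |c| := by
  have h1 : a ≤ |a| := le_abs_self a
  have h2 : -a ≤ |a| := neg_le_abs a
  have h3 : |a| = a ∨ |a| = -a := abs_choice a
  have h4 : c ≤ |c| := le_abs_self c
  have h5 : -c ≤ |c| := neg_le_abs c
  have h6 : |c| = c ∨ |c| = -c := abs_choice c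
  omega

-- ===== VERDICT (by name: the statement is the Claim_ definition above) =====
theorem solve_spec : Claim_equal_solve := by
  intro A B _ hpre
  unfold Spec_solve solve solve_alt
  simp only []
  set S := PySem.List.sorted A (fun x => x) false with hSdef
  have hS : S.Pairwise (· ≤ ·) := PySem.List.sorted_pairwise A (fun x => x)
  obtain ⟨b, rfl⟩ : ∃ b : Nat, B = (b : Int) := ⟨B.toNat, (Int.toNat_of_nonneg hpre).symm⟩
  have hmin : PySem.List.slice S (some 0) (some (b : Int))
      = PySem.List.slice S none (some (b : Int)) := PySem.List.slice_zero_start S _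
  rw [hmin, PySem.List.slice_to_natCast]
  by_cases hb : S.length ≤ b
  · -- window at least the whole array: both sides are |total|
    rw [PySem.List.pyRange_one_eq_nil (by exact_mod_cast hb)]
    have hmax0 : max 0 ((S.length : Int) - (b : Int)) = 0 := by omega
    rw [hmax0, PySem.List.slice_zero_start, PySem.List.slice_none_none,
        List.take_of_length_le hb]
    simp
  · rw [Nat.not_le] at hb
    have hmax0 : max 0 ((S.length : Int) - (b : Int)) = ((S.length - b : Nat) : Int) := by
      omega
    rw [hmax0, PySem.List.slice_from_natCast]
    have hrange : (S.length : Int) = (b : Int) + ((S.length - b : Nat) : Int) := by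
      omega
    have hmle : b + (S.length - b) ≤ S.length := by omega
    rw [hrange, pv_fold_inv S hS b S.sum (S.length - b) hmle]
    have hfull : (S.drop (S.length - b)).take b = S.drop (S.length - b) := by
      apply List.take_of_length_le
      rw [List.length_drop]
      omega
    rw [hfull]
    exact pv_abs_max _ _ (by
      have := pv_w_le S hS b (S.length - b) (by omega)
      rw [hfull] at this
      omega)
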